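-- pv_equiv track=rewrite | github.com/mminjg/Algorithms-in-Python | EPPER/15회-재고없는 날.py | solution
-- ===== SOURCE A (Python) =====
-- def solution(n, m):
--     day = 0
--     cnt = 1
--     while n > 0:
--         if cnt == m:
--             cnt = 1
--             n += 1
--         else:
--             cnt += 1
--         n -= 1
--         day += 1
--     return day
-- ===== SOURCE B (Python) =====
-- def solution(n, m):
--     # Closed form: stock depletes after n consuming days plus one extra day
--     # per refill; with m >= 2 there are (n-1)//(m-1) refills before depletion.
--     if n <= 0:
--         return 0
--     if m <= 1:
--         return n
--     return n + (n - 1) // (m - 1)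
-- ===== Notes on version B (the rewrite author's own statement) =====
-- stated objective: faster
-- what changed: Replaced the day-by-day while-loop simulation by a closed-form formula n + (n-1)//(m-1) counting the refill days arithmetically.
import Mathlib
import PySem

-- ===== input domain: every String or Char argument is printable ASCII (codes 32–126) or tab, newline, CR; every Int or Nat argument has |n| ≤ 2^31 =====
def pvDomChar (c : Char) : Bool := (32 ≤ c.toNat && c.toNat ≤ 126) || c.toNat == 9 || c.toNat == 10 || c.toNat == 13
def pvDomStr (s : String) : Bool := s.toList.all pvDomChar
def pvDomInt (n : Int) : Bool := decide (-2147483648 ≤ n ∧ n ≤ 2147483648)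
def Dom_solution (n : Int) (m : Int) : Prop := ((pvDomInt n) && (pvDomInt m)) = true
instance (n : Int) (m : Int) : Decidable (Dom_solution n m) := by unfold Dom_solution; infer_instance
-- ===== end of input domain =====

-- B replaces A's day-by-day simulation loop with a closed-form refill count (O(1) vs O(n)).

-- ===== PORT A =====
-- A's while-loop, one recursive step per iteration over the same state (n, cnt, day).
-- The fuel argument only makes the recursion total; inside Pre_solution the loop
-- terminates within the given fuel (proved below), so the port is faithful there.
def solutionLoop (m : Int) : Nat → Int → Int → Int → Int
  | 0, _, _, day => day
  | fuel + 1, n, cnt, day =>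
    if 0 < n then
      if cnt = m then solutionLoop m fuel (n + 1 - 1) 1 (day + 1)
      else solutionLoop m fuel (n - 1) (cnt + 1) (day + 1)
    else day

def solution (n : Int) (m : Int) : Int :=
  solutionLoop m (2 * n.natAbs + 2) n 1 0

-- ===== PORT B =====
def solution_alt (n : Int) (m : Int) : Int :=
  if n ≤ 0 then 0
  else if m ≤ 1 then n
  else n + PySem.Int.floordiv (n - 1) (m - 1)

-- ===== PRECONDITION & SPEC =====
-- Pre_ excludes m = 1 with positive n: there A's while-loop refills every day and never
-- terminates (A diverges; it returns no value on those inputs).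
def Pre_solution (n : Int) (m : Int) : Prop := ¬ (m = 1 ∧ 0 < n)
instance (n : Int) (m : Int) : Decidable (Pre_solution n m) := by unfold Pre_solution; infer_instance
def pvWitness_solution : Int × Int := (10, 3)

def Spec_solution (n : Int) (m : Int) (out : Int) : Prop := out = solution_alt n m
instance (n : Int) (m : Int) (out : Int) : Decidable (Spec_solution n m out) := by unfold Spec_solution; infer_instance

-- ===== CLAIM (what is proved, stated in full; the proofs are below) =====
def Claim_equal_solution : Prop := ∀ (n : Int) (m : Int), Dom_solution n m → Pre_solution n m → Spec_solution n m (solution n m)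

-- ===== LEMMAS AND PROOFS =====

-- With no stock left the loop returns immediately, whatever the fuel.
theorem solutionLoop_done (m : Int) (fuel : Nat) (n cnt day : Int) (hn : n ≤ 0) :
    solutionLoop m fuel n cnt day = day := by
  cases fuel with
  | zero => rfl
  | succ f => simp [solutionLoop]; omega

-- m ≤ 0: cnt ≥ 1 never equals m, so every day consumes one unit: day + n days total.
theorem solutionLoop_no_refill (m : Int) (hm : m ≤ 0) :
    ∀ (fuel : Nat) (n cnt day : Int), 1 ≤ cnt → 0 ≤ n → n ≤ fuel →
      solutionLoop m fuel n cnt day = day + n := by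
  intro fuel
  induction fuel with
  | zero =>
    intro n cnt day hc hn hf
    have : n = 0 := by omega
    simp [solutionLoop, this]
  | succ f ih =>
    intro n cnt day hc hn hf
    by_cases h : 0 < n
    · have hne : ¬ cnt = m := by omega
      simp only [solutionLoop, if_pos h, if_neg hne]
      rw [ih (n - 1) (cnt + 1) (day + 1) (by omega) (by omega) (by omega)]
      omega
    · rw [solutionLoop_done m _ n cnt day (by omega)]; omega

-- m ≥ 2: from state (n, cnt) the loop runs exactly n + (n + cnt - 2) / (m - 1) more days.
theorem solutionLoop_refill (m : Int) (hm : 2 ≤ m) :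
    ∀ (fuel : Nat) (n cnt day : Int), 1 ≤ cnt → cnt ≤ m → 1 ≤ n →
      n + (n + cnt - 2) / (m - 1) ≤ fuel →
      solutionLoop m fuel n cnt day = day + n + (n + cnt - 2) / (m - 1) := by
  intro fuel
  induction fuel with
  | zero =>
    intro n cnt day hc1 hc2 hn hf
    have hq : 0 ≤ (n + cnt - 2) / (m - 1) := Int.ediv_nonneg (by omega) (by omega)
    exact absurd hf (by push_cast; omega)
  | succ f ih =>
    intro n cnt day hc1 hc2 hn hf
    have hq : 0 ≤ (n + cnt - 2) / (m - 1) := Int.ediv_nonneg (by omega) (by omega)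
    simp only [solutionLoop, if_pos (show 0 < n by omega)]
    by_cases hcm : cnt = m
    · -- refill day: stock unchanged, cnt resets to 1
      rw [hcm] at hf
      have key : (n + m - 2) / (m - 1) = (n + 1 - 2) / (m - 1) + 1 := by
        have := Int.add_mul_ediv_right (n + 1 - 2) 1 (show m - 1 ≠ 0 by omega)
        rw [show n + m - 2 = n + 1 - 2 + 1 * (m - 1) by ring, this]
      rw [if_pos hcm, hcm, show n + 1 - 1 = n by ring,
        ih n 1 (day + 1) (by omega) (by omega) hn (by push_cast at hf ⊢; omega)]
      omega
    · -- consuming day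
      rw [if_neg hcm]
      have hnum : n - 1 + (cnt + 1) - 2 = n + cnt - 2 := by ring
      by_cases h1 : n = 1
      · -- last unit consumed: loop ends next iteration
        subst h1
        rw [solutionLoop_done m f (1 - 1) (cnt + 1) (day + 1) (by omega)]
        have : (1 + cnt - 2) / (m - 1) = 0 :=
          Int.ediv_eq_zero_of_lt (by omega) (by omega)
        omega
      · rw [ih (n - 1) (cnt + 1) (day + 1) (by omega) (by omega) (by omega)
          (by rw [hnum]; push_cast at hf ⊢; omega), hnum]
        ring
  
-- ===== VERDICT (by name: the statement is the Claim_ definition above) =====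
theorem solution_spec : Claim_equal_solution := by
  intro n m _ hpre
  unfold Spec_solution solution solution_alt
  by_cases hn : n ≤ 0
  · rw [solutionLoop_done m _ n 1 0 hn, if_pos hn]
  · rw [if_neg hn]
    have hn1 : 1 ≤ n := by omega
    have hna : ((2 * n.natAbs + 2 : Nat) : Int) = 2 * n + 2 := by
      have : (n.natAbs : Int) = n := Int.natAbs_of_nonneg (by omega)
      push_cast [this]; ring
    by_cases hm : m ≤ 1
    · -- m = 1 is excluded by Pre_, so m ≤ 0 here
      have hm0 : m ≤ 0 := by unfold Pre_solution at hpre; omega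
      rw [solutionLoop_no_refill m hm0 _ n 1 0 le_rfl (by omega) (by rw [hna]; omega),
        if_pos hm]
      omega
    · have hm2 : 2 ≤ m := by omega
      have hq : (n + 1 - 2) / (m - 1) ≤ n + 1 - 2 := Int.ediv_le_self _ (by omega)
      rw [solutionLoop_refill m hm2 _ n 1 0 le_rfl (by omega) hn1
          (by rw [hna]; omega), if_neg hm,
        PySem.Int.floordiv_eq_ediv_of_pos (show (0:Int) < m - 1 by omega)]
      ring_nf
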